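-- pv_equiv track=rewrite | github.com/kriyankpatil/Chat-Bot | BACKEND_)/app/modules/text_structurer.py | structure_by_keywords
-- ===== SOURCE A (Python) =====
-- def structure_by_keywords(text, keywords, case_sensitive=False):
--     """
--     Structure text by finding segments that contain specific keywords.
--
--     Args:
--         text (str): Input text to structure
--         keywords (list): List of keywords to search for
--         case_sensitive (bool): Whether to perform case-sensitive matching
--
--     Returns:
--         dict: Dictionary with keywords as keys and matching text segments as values
--     """
--     structured_data = {}
--
--     # Process the text and keywords based on case sensitivity
--     processed_text = text if case_sensitive else text.lower()
--     processed_keywords = keywords if case_sensitive else [k.lower() for k in keywords]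
--
--     # Search for each keyword in the text
--     for i, keyword in enumerate(processed_keywords):
--         if keyword in processed_text:
--             # Use the original keyword as the key
--             original_keyword = keywords[i]
--             structured_data[original_keyword] = text
--
--     return structured_data
-- ===== SOURCE B (Python) =====
-- def structure_by_keywords(text, keywords, case_sensitive=False):
--     hay = text if case_sensitive else text.lower()
--     windows_by_len = {}  # length -> set of all substrings of hay of that length
--     result = {}
--     for kw in keywords:
--         needle = kw if case_sensitive else kw.lower()
--         L = len(needle)
--         if L not in windows_by_len:
--             windows_by_len[L] = {hay[i:i + L] for i in range(len(hay) - L + 1)}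
--         if needle in windows_by_len[L]:
--             result[kw] = text
--     return result
-- ===== Notes on version B (the rewrite author's own statement) =====
-- stated objective: alternative
-- what changed: A scans the whole text with a fresh substring search for every keyword; B builds, once per distinct keyword length L, a hash set of all length-L windows of the text and answers each keyword by a single set lookup, so the text is scanned once per distinct length instead of once per keyword.
import Mathlib
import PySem

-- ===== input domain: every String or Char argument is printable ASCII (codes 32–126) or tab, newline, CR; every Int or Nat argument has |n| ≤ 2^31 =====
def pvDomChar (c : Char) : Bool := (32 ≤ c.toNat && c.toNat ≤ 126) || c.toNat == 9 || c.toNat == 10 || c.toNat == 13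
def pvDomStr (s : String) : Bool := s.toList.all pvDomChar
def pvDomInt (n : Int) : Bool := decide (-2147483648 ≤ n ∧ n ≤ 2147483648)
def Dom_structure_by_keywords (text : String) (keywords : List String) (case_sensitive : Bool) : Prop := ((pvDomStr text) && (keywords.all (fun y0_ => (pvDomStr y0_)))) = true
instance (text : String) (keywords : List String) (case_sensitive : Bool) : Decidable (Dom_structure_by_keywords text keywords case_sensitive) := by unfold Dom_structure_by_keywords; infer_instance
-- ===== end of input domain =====

-- B replaces A's per-keyword substring scan by hash-set lookups in sets of all fixed-length
-- windows of the text, built once per distinct keyword length (objective: alternative).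

-- ===== PORT A =====
-- literal port of A: lower text/keywords unless case_sensitive, then for i, keyword in
-- enumerate(processed_keywords): if keyword in processed_text: dict[keywords[i]] = text.
-- keywords[i] is always in range here, so pyGetD with a dummy default is exact.
def structure_by_keywords (text : String) (keywords : List String) (case_sensitive : Bool) : List (String × String) :=
  let processed_text := if case_sensitive then text else PySem.Str.lower text
  let processed_keywords := if case_sensitive then keywords else keywords.map PySem.Str.lower
  ((PySem.List.enumerate processed_keywords).foldl
      (fun (d : PySem.Dict String String) (ik : Int × String) =>
        if PySem.Str.isIn ik.2 processed_text then
          d.insert (PySem.List.pyGetD keywords ik.1 "") text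
        else d)
      PySem.Dict.empty).items

-- ===== PORT B =====
-- {hay[i:i+L] for i in range(len(hay) - L + 1)} : the set of all length-L windows of hay
def pvWindows (hay : List Char) (L : Nat) : PySem.Set (List Char) :=
  PySem.Set.ofList
    ((PySem.List.pyRange 0 ((hay.length : Int) - (L : Int) + 1)).map
      (fun i => PySem.List.slice hay (some i) (some (i + (L : Int)))))

-- literal port of Source B (strings handled on the List Char side): one fold over keywords
-- carrying (windows_by_len, result); membership test is a set lookup.
def structure_by_keywords_alt (text : String) (keywords : List String) (case_sensitive : Bool) : List (String × String) :=
  let hay : List Char := if case_sensitive then text.toList else PySem.Chars.lower text.toList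
  (keywords.foldl
      (fun (st : PySem.Dict Nat (PySem.Set (List Char)) × PySem.Dict String String) (kw : String) =>
        let needle : List Char := if case_sensitive then kw.toList else PySem.Chars.lower kw.toList
        let ws := if st.1.contains needle.length then st.1 else st.1.insert needle.length (pvWindows hay needle.length)
        (ws, if PySem.Set.contains (ws.getD needle.length PySem.Set.empty) needle then st.2.insert kw text else st.2))
      (PySem.Dict.empty, PySem.Dict.empty)).2.items

-- ===== PRECONDITION & SPEC =====
def Spec_structure_by_keywords (text : String) (keywords : List String) (case_sensitive : Bool) (out : List (String × String)) : Prop := out = structure_by_keywords_alt text keywords case_sensitive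
instance (text : String) (keywords : List String) (case_sensitive : Bool) (out : List (String × String)) : Decidable (Spec_structure_by_keywords text keywords case_sensitive out) := by unfold Spec_structure_by_keywords; infer_instance

-- ===== CLAIM (what is proved, stated in full; the proofs are below) =====
def Claim_equal_structure_by_keywords : Prop := ∀ (text : String) (keywords : List String) (case_sensitive : Bool), Dom_structure_by_keywords text keywords case_sensitive → Spec_structure_by_keywords text keywords case_sensitive (structure_by_keywords text keywords case_sensitive)

-- ===== LEMMAS AND PROOFS =====

-- membership in the window set of needle's own length is exactly Python's 'needle in hay'
lemma contains_pvWindows (hay needle : List Char) :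
    PySem.Set.contains (pvWindows hay needle.length) needle = PySem.Chars.isIn needle hay := by
  rw [Bool.eq_iff_iff, PySem.Set.contains_iff, pvWindows, PySem.Set.mem_ofList,
    ← PySem.Chars.exists_prefix_drop_iff_isIn]
  constructor
  · rintro h
    simp only [List.mem_map] at h
    obtain ⟨i, hi, hslice⟩ := h
    rw [PySem.List.mem_pyRange_one] at hi
    obtain ⟨hi0, hilt⟩ := hi
    lift i to ℕ using hi0 with j
    refine ⟨j, ?_⟩
    rw [show ((j : Int) + (needle.length : Int)) = ((j + needle.length : Nat) : Int) by omega] at hslice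
    rw [PySem.List.slice_natCast] at hslice
    rw [show j + needle.length - j = needle.length by omega] at hslice
    rw [List.prefix_iff_eq_take]
    exact hslice.symm
  · rintro ⟨j, hpre⟩
    simp only [List.mem_map]
    by_cases hj : j ≤ hay.length
    · have hlen : needle.length ≤ hay.length - j := by
        have := hpre.length_le
        simpa using this
      refine ⟨(j : Int), ?_, ?_⟩
      · rw [PySem.List.mem_pyRange_one]
        refine ⟨by exact_mod_cast Int.natCast_nonneg j, by omega⟩
      · rw [show ((j : Int) + (needle.length : Int)) = ((j + needle.length : Nat) : Int) by omega]
        rw [PySem.List.slice_natCast]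
        rw [show j + needle.length - j = needle.length by omega]
        exact ((List.prefix_iff_eq_take).1 hpre).symm
    · have hdrop : hay.drop j = [] := List.drop_eq_nil_of_le (by omega)
      rw [hdrop] at hpre
      have hnil : needle = [] := List.prefix_nil.1 hpre
      subst hnil
      refine ⟨0, ?_, ?_⟩
      · rw [PySem.List.mem_pyRange_one]
        refine ⟨le_refl 0, by simp only [List.length_nil]; push_cast; omega⟩
      · have h0 := PySem.List.slice_natCast hay 0 0
        simpa using h0

-- A's enumerate loop over the processed keywords is the plain fold over keywords
lemma A_enum_fold (text ptext : String) (g : String → String) :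
    ∀ (l K : List String) (s : Nat), K.drop s = l → ∀ (d0 : PySem.Dict String String),
    ((PySem.List.enumerate (l.map g) (s : Int)).foldl
        (fun (d : PySem.Dict String String) (ik : Int × String) =>
          if PySem.Str.isIn ik.2 ptext then d.insert (PySem.List.pyGetD K ik.1 "") text else d)
        d0)
      = l.foldl (fun d kw => if PySem.Str.isIn (g kw) ptext then d.insert kw text else d) d0 := by
  intro l
  induction l with
  | nil => intro K s h d0; rfl
  | cons x t ih =>
    intro K s h d0
    have hx : PySem.List.pyGetD K ((s : Int)) "" = x := by
      rw [PySem.List.pyGetD_natCast]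
      have h0 : (K.drop s)[0]? = some x := by rw [h]; rfl
      have : K[s]? = some x := by simpa using h0
      simp [List.getD, this]
    have ht : K.drop (s + 1) = t := by
      have h2 : K.drop (s + 1) = (K.drop s).drop 1 := by
        rw [List.drop_drop]
      rw [h2, h]
      rfl
    simp only [List.map_cons, PySem.List.enumerate_cons, List.foldl_cons, hx]
    rw [show ((s : Int) + 1) = (((s + 1 : Nat)) : Int) by omega]
    exact ih K (s + 1) ht _

-- B's stateful fold (with the memo table of window sets) computes the plain fold over keywords
lemma B_fold (text : String) (proc : String → List Char) (hay : List Char) :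
    ∀ (l : List String) (ws : PySem.Dict Nat (PySem.Set (List Char))) (res : PySem.Dict String String),
    (∀ L : Nat, ws.contains L = true → ws.getD L PySem.Set.empty = pvWindows hay L) →
    (l.foldl
        (fun (st : PySem.Dict Nat (PySem.Set (List Char)) × PySem.Dict String String) (kw : String) =>
          ((if st.1.contains (proc kw).length then st.1 else st.1.insert (proc kw).length (pvWindows hay (proc kw).length)),
            if PySem.Set.contains ((if st.1.contains (proc kw).length then st.1 else st.1.insert (proc kw).length (pvWindows hay (proc kw).length)).getD (proc kw).length PySem.Set.empty) (proc kw) then st.2.insert kw text else st.2))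
        (ws, res)).2
      = l.foldl (fun d kw => if PySem.Chars.isIn (proc kw) hay then d.insert kw text else d) res := by
  intro l
  induction l with
  | nil => intro ws res _; rfl
  | cons x t ih =>
    intro ws res hws
    simp only [List.foldl_cons]
    by_cases hc : ws.contains (proc x).length = true
    · simp only [hc, if_true]
      rw [hws _ hc, contains_pvWindows]
      exact ih ws _ hws
    · simp only [hc, if_false, Bool.false_eq_true]
      rw [PySem.Dict.getD_insert_self, contains_pvWindows]
      refine ih _ _ ?_
      intro L' hc'
      rw [PySem.Dict.getD_insert]
      by_cases hLL : L' = (proc x).length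
      · simp [hLL]
      · simp only [hLL, if_false]
        rw [PySem.Dict.contains_insert, Bool.or_eq_true, beq_iff_eq] at hc'
        exact hws L' (hc'.resolve_left hLL)

-- ===== VERDICT (by name: the statement is the Claim_ definition above) =====
theorem structure_by_keywords_spec : Claim_equal_structure_by_keywords := by
  intro text keywords cs _
  unfold Spec_structure_by_keywords structure_by_keywords structure_by_keywords_alt
  cases cs
  · -- case_sensitive = False
    simp only [Bool.false_eq_true, if_false, PySem.Str.isIn_eq, PySem.Str.toList_lower]
    rw [show PySem.List.enumerate (List.map PySem.Str.lower keywords)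
        = PySem.List.enumerate (List.map PySem.Str.lower keywords) (((0 : Nat)) : Int) from rfl]
    have hA := A_enum_fold text (PySem.Str.lower text) PySem.Str.lower keywords keywords 0 rfl PySem.Dict.empty
    simp only [PySem.Str.isIn_eq, PySem.Str.toList_lower] at hA
    rw [hA]
    have hB := B_fold text (fun kw => PySem.Chars.lower kw.toList) (PySem.Chars.lower text.toList)
      keywords PySem.Dict.empty PySem.Dict.empty (by intro L h; simp [PySem.Dict.contains_empty] at h)
    rw [hB]
  · -- case_sensitive = True
    simp only [if_true, PySem.Str.isIn_eq]
    rw [show PySem.List.enumerate keywords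
        = PySem.List.enumerate keywords (((0 : Nat)) : Int) from rfl]
    have hA := A_enum_fold text text id keywords keywords 0 rfl PySem.Dict.empty
    simp only [List.map_id, id_eq, PySem.Str.isIn_eq] at hA
    have hB := B_fold text (fun kw => kw.toList) text.toList keywords PySem.Dict.empty PySem.Dict.empty
      (by intro L h; simp [PySem.Dict.contains_empty] at h)
    rw [hB]
    exact congrArg PySem.Dict.items hA
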